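-- pv_equiv track=rewrite | github.com/ldct/cp | atcoder/abc241/C/C.py | off_diag
-- ===== SOURCE A (Python) =====
-- def off_diag(grid):
--     ret = []
--     for _ in range(len(grid) + len(grid[0]) - 1):
--         ret += [[]]
--
--     for x in range(len(grid)):
--         for y in range(len(grid[0])):
--             ret[x+y] += [grid[x][y]]
--
--     return ret
-- ===== SOURCE B (Python) =====
-- def off_diag(grid):
--     n, m = len(grid), len(grid[0])
--     return [[grid[x][d - x] for x in range(max(0, d - m + 1), min(d, n - 1) + 1)]
--             for d in range(n + m - 1)]
-- ===== Notes on version B (the rewrite author's own statement) =====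
-- stated objective: simpler
-- what changed: B builds each anti-diagonal directly (outer loop over the diagonal index d, inner over the exact x-range of that diagonal) instead of preallocating buckets and scattering every cell into ret[x+y].
import Mathlib
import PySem

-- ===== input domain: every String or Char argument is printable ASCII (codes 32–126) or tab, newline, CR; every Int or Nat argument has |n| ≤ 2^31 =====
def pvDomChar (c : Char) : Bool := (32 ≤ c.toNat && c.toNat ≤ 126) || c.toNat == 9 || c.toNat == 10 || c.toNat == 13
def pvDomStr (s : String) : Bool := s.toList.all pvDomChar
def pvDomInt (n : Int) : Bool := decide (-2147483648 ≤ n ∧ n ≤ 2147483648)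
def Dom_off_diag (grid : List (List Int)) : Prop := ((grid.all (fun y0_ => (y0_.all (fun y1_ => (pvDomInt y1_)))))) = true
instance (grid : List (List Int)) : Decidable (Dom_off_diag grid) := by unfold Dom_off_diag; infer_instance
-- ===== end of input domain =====

-- B builds each anti-diagonal directly from its exact index range instead of scattering
-- every cell into preallocated buckets; objective: simpler (same asymptotic cost).

-- ===== PORT A =====
-- grid[x][y] with in-range nonnegative indices (guaranteed by Pre_) is ported via getD;
-- ret[x+y] is always in range since x+y ≤ n+m-2, so ret[x+y] += [..] is set at x+y.
def off_diag (grid : List (List Int)) : List (List Int) :=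
  let n := grid.length
  let m := (grid.headD []).length
  let ret := List.replicate (n + m - 1) ([] : List Int)
  (List.range n).foldl (fun r x =>
    (List.range m).foldl (fun r y =>
      r.set (x + y) ((r.getD (x + y) []) ++ [(grid.getD x []).getD y 0])) r) ret

-- ===== PORT B =====
-- range(max(0,d-m+1), min(d,n-1)+1): both bounds are nonnegative naturals on admitted
-- inputs, so the Python range is ported as List.range' lo (hi - lo); grid[x][d-x] via getD.
def off_diag_alt (grid : List (List Int)) : List (List Int) :=
  let n := grid.length
  let m := (grid.headD []).length
  (List.range (n + m - 1)).map (fun d =>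
    let lo := if m ≤ d then d - m + 1 else 0
    let hi := min d (n - 1) + 1
    (List.range' lo (hi - lo)).map (fun x => (grid.getD x []).getD (d - x) 0))

-- ===== PRECONDITION & SPEC =====
-- Pre_ excludes exactly the inputs where Python A raises an IndexError: the empty grid
-- (len(grid[0])) and grids in which some row is shorter than row 0 (grid[x][y]).
def Pre_off_diag (grid : List (List Int)) : Prop :=
  grid ≠ [] ∧ ∀ r ∈ grid, (grid.headD []).length ≤ r.length
instance (grid : List (List Int)) : Decidable (Pre_off_diag grid) := by
  unfold Pre_off_diag; infer_instance
def pvWitness_off_diag : List (List Int) := [[1, 2], [3, 4]]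
def Spec_off_diag (grid : List (List Int)) (out : List (List Int)) : Prop := out = off_diag_alt grid
instance (grid : List (List Int)) (out : List (List Int)) : Decidable (Spec_off_diag grid out) := by unfold Spec_off_diag; infer_instance

-- ===== CLAIM (what is proved, stated in full; the proofs are below) =====
def Claim_equal_off_diag : Prop := ∀ (grid : List (List Int)), Dom_off_diag grid → Pre_off_diag grid → Spec_off_diag grid (off_diag grid)

-- ===== LEMMAS AND PROOFS =====

-- the value both ports read at cell (x, y)
def pvCell (grid : List (List Int)) (x y : ℕ) : Int := (grid.getD x []).getD y 0

-- the contribution of row x to diagonal d (m = row width)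
def pvContrib (grid : List (List Int)) (m d x : ℕ) : List Int :=
  if x ≤ d ∧ d < x + m then [pvCell grid x (d - x)] else []

-- getD after a set
theorem pv_getD_set {α : Type} (l : List α) (i d : ℕ) (a dflt : α) :
    (l.set i a).getD d dflt = if i = d ∧ d < l.length then a else l.getD d dflt := by
  rw [List.getD_eq_getElem?_getD, List.getD_eq_getElem?_getD, List.getElem?_set]
  split_ifs with h1 h2 h3 h4 <;>
    first | rfl | omega | (simp [List.getElem?_eq_none (by omega : l.length ≤ d)])

-- flatMap of a singleton-if is map over the filter
theorem pv_flatMap_if {α β : Type} (p : α → Prop) [DecidablePred p] (f : α → β) :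
    ∀ l : List α, (l.flatMap (fun x => if p x then [f x] else [])) = (l.filter (fun x => decide (p x))).map f := by
  intro l
  induction l with
  | nil => rfl
  | cons a l ih =>
    by_cases h : p a <;> simp [List.flatMap_cons, h, ih]

-- filtering an interval out of range n
theorem pv_filter_range (lo hi : ℕ) :
    ∀ n : ℕ, (List.range n).filter (fun x => decide (lo ≤ x ∧ x < hi)) = List.range' lo (min hi n - lo) := by
  intro n
  induction n with
  | zero => simp
  | succ n ih =>
    rw [List.range_succ, List.filter_append, ih]
    by_cases h1 : lo ≤ n ∧ n < hi
    · have hmin : min hi n = n := by omega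
      have hmin' : min hi (n + 1) = n + 1 := by omega
      have hcat : List.range' lo (n - lo) ++ [n] = List.range' lo (n - lo + 1) := by
        rw [List.range'_concat]
        have : lo + 1 * (n - lo) = n := by omega
        rw [this]
      simp only [List.filter_cons, List.filter_nil, decide_eq_true_eq, if_pos h1, hmin, hmin']
      rw [hcat]
      congr 1
      omega
    · have hnil : ((([n] : List ℕ)).filter (fun x => decide (lo ≤ x ∧ x < hi))) = [] := by
        simp only [List.filter_cons, List.filter_nil, decide_eq_true_eq]
        rw [if_neg h1]
      rw [hnil, List.append_nil]
      congr 1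
      omega

-- one inner pass of A (row x over all y < k) appends row-x's contribution to each bucket
theorem pv_inner (grid : List (List Int)) (x : ℕ) :
    ∀ (k : ℕ) (r : List (List Int)), x + k ≤ r.length →
      ((List.range k).foldl (fun r y =>
          r.set (x + y) ((r.getD (x + y) []) ++ [pvCell grid x y])) r).length = r.length ∧
      ∀ d, d < r.length →
        ((List.range k).foldl (fun r y =>
            r.set (x + y) ((r.getD (x + y) []) ++ [pvCell grid x y])) r).getD d []
          = r.getD d [] ++ pvContrib grid k d x := by
  intro k
  induction k with
  | zero =>
    intro r _
    refine ⟨rfl, ?_⟩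
    intro d _
    unfold pvContrib
    rw [if_neg (by omega)]
    simp
  | succ k ih =>
    intro r hr
    obtain ⟨hlen, hval⟩ := ih r (by omega)
    rw [List.range_succ, List.foldl_append]
    set r' := (List.range k).foldl (fun r y =>
        r.set (x + y) ((r.getD (x + y) []) ++ [pvCell grid x y])) r with hr'
    simp only [List.foldl_cons, List.foldl_nil]
    refine ⟨by simp [hlen], ?_⟩
    intro d hd
    rw [pv_getD_set]
    by_cases hdx : d = x + k
    · subst hdx
      rw [if_pos ⟨rfl, by omega⟩, hval (x + k) hd]
      unfold pvContrib
      rw [if_neg (by omega), if_pos (by omega)]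
      simp
    · rw [if_neg (fun hc => hdx hc.1.symm), hval d hd]
      unfold pvContrib
      by_cases h1 : x ≤ d ∧ d < x + k
      · rw [if_pos h1, if_pos (by omega)]
      · rw [if_neg h1, if_neg (by omega)]

-- after A's outer loop over rows 0..k-1, bucket d holds the first k contributions in order
theorem pv_outer (grid : List (List Int)) (m L : ℕ) (hL : ∀ x, x < grid.length → x + m ≤ L) :
    ∀ k, k ≤ grid.length →
      ((List.range k).foldl (fun r x =>
          (List.range m).foldl (fun r y =>
            r.set (x + y) ((r.getD (x + y) []) ++ [pvCell grid x y])) r)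
        (List.replicate L ([] : List Int))).length = L ∧
      ∀ d, d < L →
        ((List.range k).foldl (fun r x =>
            (List.range m).foldl (fun r y =>
              r.set (x + y) ((r.getD (x + y) []) ++ [pvCell grid x y])) r)
          (List.replicate L ([] : List Int))).getD d []
          = (List.range k).flatMap (pvContrib grid m d) := by
  intro k
  induction k with
  | zero =>
    intro _
    refine ⟨by simp, ?_⟩
    intro d hd
    rw [List.getD_eq_getElem?_getD]
    simp [hd]
  | succ k ihk =>
    intro hk
    obtain ⟨hlen, hval⟩ := ihk (by omega)
    rw [List.range_succ, List.foldl_append]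
    set r' := (List.range k).foldl (fun r x =>
        (List.range m).foldl (fun r y =>
          r.set (x + y) ((r.getD (x + y) []) ++ [pvCell grid x y])) r)
      (List.replicate L ([] : List Int)) with hr'
    simp only [List.foldl_cons, List.foldl_nil]
    have hx : k + m ≤ r'.length := by rw [hlen]; exact hL k (by omega)
    obtain ⟨hlen2, hval2⟩ := pv_inner grid k m r' hx
    refine ⟨by rw [hlen2, hlen], ?_⟩
    intro d hd
    rw [hval2 d (by omega), hval d hd]
    simp [List.flatMap_append]

-- B's inner interval is exactly the filtered x-range of diagonal d
theorem pv_diag_eq (grid : List (List Int)) (n m d : ℕ) (hn : n = grid.length)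
    (hm : m = (grid.headD []).length) (hd : d < n + m - 1) :
    (List.range' (if m ≤ d then d - m + 1 else 0)
        (min d (n - 1) + 1 - (if m ≤ d then d - m + 1 else 0))).map
      (fun x => (grid.getD x []).getD (d - x) 0)
      = (List.range n).flatMap (pvContrib grid m d) := by
  have hn1 : 1 ≤ n := by
    by_contra h
    have hz : n = 0 := by omega
    have hgrid : grid = [] := by
      cases grid with
      | nil => rfl
      | cons a l => rw [hz] at hn; simp at hn
    rw [hgrid] at hm
    simp at hm
    omega
  unfold pvContrib pvCell
  rw [pv_flatMap_if (fun x => x ≤ d ∧ d < x + m) (fun x => (grid.getD x []).getD (d - x) 0)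
      (List.range n)]
  have hcond : (List.range n).filter (fun x => decide (x ≤ d ∧ d < x + m))
      = (List.range n).filter
          (fun x => decide ((if m ≤ d then d - m + 1 else 0) ≤ x ∧ x < min d (n - 1) + 1)) := by
    apply List.filter_congr
    intro x hx
    rw [List.mem_range] at hx
    have hiff : (x ≤ d ∧ d < x + m) ↔
        ((if m ≤ d then d - m + 1 else 0) ≤ x ∧ x < min d (n - 1) + 1) := by
      by_cases hmd : m ≤ d
      · rw [if_pos hmd]; omega
      · rw [if_neg hmd]; omega
    simp [hiff]
  rw [hcond, pv_filter_range]
  congr 2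
  split_ifs <;> omega

-- ===== VERDICT (by name: the statement is the Claim_ definition above) =====
theorem off_diag_spec : Claim_equal_off_diag := by
  intro grid _ _
  unfold Spec_off_diag off_diag off_diag_alt
  set n := grid.length with hn
  set m := (grid.headD []).length with hm
  obtain ⟨hlen, hval⟩ := pv_outer grid m (n + m - 1)
    (by intro x hx; omega) n (le_refl n)
  simp only [pvCell] at hlen hval
  apply List.ext_getElem
  · rw [hlen]; simp
  · intro d h1 h2
    have hd : d < n + m - 1 := by simpa using h2
    have hv := hval d hd
    rw [List.getD_eq_getElem?_getD, List.getElem?_eq_getElem h1] at hv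
    simp only [Option.getD_some] at hv
    rw [List.getElem_map, List.getElem_range, hv]
    exact (pv_diag_eq grid n m d hn hm hd).symm
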